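-- pv_equiv track=rewrite | github.com/Aasthaengg/IBMdataset | Python_codes/p03138/s968306087.py | max_f
-- ===== SOURCE A (Python) =====
-- def max_f(K, A):
--     K += 1
--     N = len(A)
--     len_K = len('{:b}'.format(K))
--     max_KA = max([K, max(A)])
--     max_len = len('{:b}'.format(max_KA))
--     bin_K = '{{:0{}b}}'.format(max_len).format(K)
--     bin_A = ['{{:0{}b}}'.format(max_len).format(a) for a in A]
--     bit_A_sum = [sum([int(bin_str[-(i+1)]) for bin_str in bin_A]) for i in range(max_len)]
--     bit_K = [int(bin_K[-(i+1)]) for i in range(max_len)]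
--     f_val = [0 for _ in range(len_K)]
--     for free_len in range(len_K):
--         if bit_K[free_len] == 0:
--             continue
--         digit_x = [0 for _ in range(max_len)]
--         for j, (ba, bk) in enumerate(zip(bit_A_sum, bit_K)):
--             if j < free_len:
--                 digit_x[j] = max([ba, N - ba])
--             elif j == free_len:
--                 # bit_K[free_len] == 1 -> bit_x[free_len] == 0
--                 digit_x[j] = ba
--             else:
--                 digit_x[j] = ba if bk == 0 else (N - ba)
--         f_val[free_len] = sum([(2**i) * d for i, d in enumerate(digit_x)])
--     return int(max(f_val))
-- ===== SOURCE B (Python) =====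
-- def max_f(K, A):
--     Kp = K + 1
--     N = len(A)
--     m = max(max(A), Kp)
--     L = max(m.bit_length(), 1)
--     c = [sum((a >> i) & 1 for a in A) for i in range(L)]
--     free = [0]
--     for i in range(L):
--         free.append(free[-1] + max(c[i], N - c[i]) * 2 ** i)
--     best = 0
--     prefix = 0
--     for i in range(L - 1, -1, -1):
--         if (Kp >> i) & 1:
--             best = max(best, prefix + c[i] * 2 ** i + free[i])
--             prefix += (N - c[i]) * 2 ** i
--         else:
--             prefix += c[i] * 2 ** i
--     return best
-- ===== Notes on version B (the rewrite author's own statement) =====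
-- stated objective: alternative
-- what changed: Instead of formatting every number as a zero-padded binary string and rebuilding a full digit_x array for each set bit of K+1, B extracts per-bit counts arithmetically once, precomputes a table free[i] of the unconstrained low-bit contributions, and picks the best candidate in a single high-to-low sweep that threads the forced prefix value.
-- outside the precondition, e.g. on max_f(1, [-5, 2]): A returns 3, B returns 5
import Mathlib
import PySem

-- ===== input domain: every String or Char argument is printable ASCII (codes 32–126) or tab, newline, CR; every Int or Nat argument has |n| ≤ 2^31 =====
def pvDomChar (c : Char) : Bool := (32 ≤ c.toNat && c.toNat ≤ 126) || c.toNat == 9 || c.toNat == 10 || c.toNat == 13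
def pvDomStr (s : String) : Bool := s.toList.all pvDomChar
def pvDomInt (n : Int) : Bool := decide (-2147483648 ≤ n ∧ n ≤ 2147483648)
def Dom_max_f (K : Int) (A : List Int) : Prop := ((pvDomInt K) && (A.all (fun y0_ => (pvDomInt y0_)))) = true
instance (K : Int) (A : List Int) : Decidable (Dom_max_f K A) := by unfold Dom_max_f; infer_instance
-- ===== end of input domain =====

-- B replaces A's per-candidate string rebuild (one padded-binary digit pass per set bit of K+1)
-- by one high-to-low sweep over bit positions with a running prefix value and a precomputed
-- suffix table of "free" contributions; bits are read arithmetically, not from format strings.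
-- Pre_ restricts to the task's natural domain (nonempty A, K ≥ -1, nonnegative elements);
-- outside it A raises (ValueError/IndexError) on most inputs, and where it does return the
-- value is an artefact of '-' escaping the scanned zero-padded slice.


-- ===== PORT A =====
-- int(c) on the one-char binary digits produced by '{:b}' (exact there; ValueError = none, unreachable under Pre_)
def chInt (c : Char) : Int := (PySem.Int.ofChars? [c]).getD 0

-- '{{:0{}b}}'.format(w).format(v): '{:b}' (= PySem.Int.toBinChars) zero-padded on the left to width w
def padBin (w : Nat) (v : Int) : List Char :=
  List.replicate (w - (PySem.Int.toBinChars v).length) '0' ++ PySem.Int.toBinChars v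

def max_f (K : Int) (A : List Int) : Int :=
  let K' := K + 1
  let N : Int := (A.length : Int)
  let lenK := (PySem.Int.toBinChars K').length
  -- max([K, max(A)]); max(A) raises ValueError on A = [] (excluded by Pre_)
  let maxKA := max K' ((PySem.List.max? A (fun y => y)).getD 0)
  let maxLen := (PySem.Int.toBinChars maxKA).length
  let binK := padBin maxLen K'
  let binA := A.map (fun a => padBin maxLen a)
  -- bin_str[-(i+1)]: IndexError = none, unreachable under Pre_
  let bitASum := (List.range maxLen).map (fun (i : Nat) =>
    (binA.map (fun s => chInt ((PySem.List.pyGet? s (-((i : Int) + 1))).getD '0'))).sum)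
  let bitK := (List.range maxLen).map (fun (i : Nat) =>
    chInt ((PySem.List.pyGet? binK (-((i : Int) + 1))).getD '0'))
  let fval := (List.range lenK).map (fun fl =>
    if bitK.getD fl 0 = 0 then 0
    else
      let digitX := ((bitASum.zip bitK).zipIdx).map (fun p =>
        if p.2 < fl then max p.1.1 (N - p.1.1)
        else if p.2 = fl then p.1.1
        else if p.1.2 = 0 then p.1.1 else N - p.1.1)
      (digitX.zipIdx.map (fun q => (2 : Int) ^ q.2 * q.1)).sum)
  -- int(max(f_val)); f_val is nonempty (len_K ≥ 1)
  (PySem.List.max? fval (fun y => y)).getD 0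

-- ===== PORT B =====
def max_f_alt (K : Int) (A : List Int) : Int :=
  let Kp := K + 1
  let N : Int := (A.length : Int)
  -- max(max(A), Kp); max(A) raises ValueError on A = [] (excluded by Pre_)
  let m := max ((PySem.List.max? A (fun y => y)).getD 0) Kp
  let L := max (PySem.Int.bitLength m) 1
  let c := (List.range L).map (fun i => (A.map (fun a => PySem.Int.band (a >>> i) 1)).sum)
  let free := (List.range L).foldl
    (fun fr i => fr ++ [PySem.List.pyGetD fr (-1) 0 + max (c.getD i 0) (N - c.getD i 0) * (2 : Int) ^ i]) [0]
  (((List.range L).reverse).foldl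
    (fun (s : Int × Int) (i : Nat) =>
      if PySem.Int.band (Kp >>> i) 1 ≠ 0 then
        (max s.1 (s.2 + c.getD i 0 * (2 : Int) ^ i + free.getD i 0), s.2 + (N - c.getD i 0) * (2 : Int) ^ i)
      else (s.1, s.2 + c.getD i 0 * (2 : Int) ^ i))
    (0, 0)).1

-- ===== PRECONDITION & SPEC =====
-- Pre_ restricts to the task's natural domain: nonempty A, K ≥ -1, nonnegative elements.
-- Outside it A raises on almost every input (ValueError on [], on '-' reached by int(), IndexError
-- for K < -1); on the rare negative-element inputs where A still returns, its value comes from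
-- reading only the last max_len characters of an unpadded '-…' binary string.
def Pre_max_f (K : Int) (A : List Int) : Prop := A ≠ [] ∧ 0 ≤ K + 1 ∧ ∀ a ∈ A, 0 ≤ a
instance (K : Int) (A : List Int) : Decidable (Pre_max_f K A) := by unfold Pre_max_f; infer_instance
def pvWitness_max_f : Int × List Int := (5, [1, 6, 3])

def Spec_max_f (K : Int) (A : List Int) (out : Int) : Prop := out = max_f_alt K A
instance (K : Int) (A : List Int) (out : Int) : Decidable (Spec_max_f K A out) := by unfold Spec_max_f; infer_instance

-- ===== CLAIM (what is proved, stated in full; the proofs are below) =====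
def Claim_equal_max_f : Prop := ∀ (K : Int) (A : List Int), Dom_max_f K A → Pre_max_f K A → Spec_max_f K A (max_f K A)

-- ===== LEMMAS AND PROOFS =====

lemma tdc_succ (f n : Nat) (l : List Char) :
    Nat.toDigitsCore 2 (f+1) n l =
      if n / 2 = 0 then (n % 2).digitChar :: l
      else Nat.toDigitsCore 2 f (n / 2) ((n % 2).digitChar :: l) := by
  conv_lhs => rw [Nat.toDigitsCore]

lemma tdc_acc : ∀ (f n : Nat) (l : List Char),
    Nat.toDigitsCore 2 f n l = Nat.toDigitsCore 2 f n [] ++ l := by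
  intro f
  induction f with
  | zero => intro n l; rfl
  | succ f ih =>
    intro n l
    rw [tdc_succ, tdc_succ]
    by_cases h : n / 2 = 0
    · simp [h]
    · rw [if_neg h, if_neg h, ih (n/2) ((n % 2).digitChar :: l), ih (n/2) [(n % 2).digitChar]]
      simp

lemma tdc_fuel : ∀ (n f g : Nat), n < f → n < g →
    Nat.toDigitsCore 2 f n [] = Nat.toDigitsCore 2 g n [] := by
  intro n
  induction n using Nat.strong_induction_on with
  | _ n ih =>
    intro f g hf hg
    match f, g with
    | f+1, g+1 =>
      rw [tdc_succ, tdc_succ]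
      by_cases h : n / 2 = 0
      · simp [h]
      · rw [if_neg h, if_neg h, tdc_acc f, tdc_acc g]
        have hlt : n / 2 < n := Nat.div_lt_self (by omega) (by omega)
        rw [ih (n/2) hlt f g (by omega) (by omega)]

lemma toDigits2_lt (n : Nat) (h : n < 2) : Nat.toDigits 2 n = [if n = 1 then '1' else '0'] := by
  interval_cases n <;> rfl

lemma toDigits2_rec (n : Nat) (h : 2 ≤ n) :
    Nat.toDigits 2 n = Nat.toDigits 2 (n / 2) ++ [if n % 2 = 1 then '1' else '0'] := by
  have h2 : n / 2 ≠ 0 := by omega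
  have hlt : n / 2 < n := Nat.div_lt_self (by omega) (by omega)
  unfold Nat.toDigits
  rw [tdc_succ, if_neg h2, tdc_acc, tdc_fuel (n/2) n (n/2+1) hlt (by omega)]
  congr 1
  have : n % 2 = 0 ∨ n % 2 = 1 := by omega
  rcases this with h1 | h1 <;> simp [h1, Nat.digitChar]

lemma toDigits2_rev_getD : ∀ (n i : Nat),
    ((Nat.toDigits 2 n).reverse).getD i '0' = if n / 2 ^ i % 2 = 1 then '1' else '0' := by
  intro n
  induction n using Nat.strong_induction_on with
  | _ n ih =>
    intro i
    by_cases h : n < 2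
    · rw [toDigits2_lt n h]
      cases i with
      | zero =>
        simp only [List.reverse_singleton, List.getD]
        have : n = 0 ∨ n = 1 := by omega
        rcases this with h1 | h1 <;> simp [h1]
      | succ i =>
        have : n / 2 ^ (i+1) = 0 := by
          have : 2 ≤ 2 ^ (i+1) := by
            have := Nat.one_lt_two_pow (n := i+1) (by omega)
            omega
          exact Nat.div_eq_of_lt (by omega)
        simp [this]
    · rw [toDigits2_rec n (by omega)]
      rw [List.reverse_append]
      cases i with
      | zero => simp
      | succ i =>
        have hlt : n / 2 < n := Nat.div_lt_self (by omega) (by omega)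
        have := ih (n/2) hlt i
        simp only [List.reverse_singleton, List.singleton_append, List.getD_cons_succ]
        rw [this]
        have : n / 2 / 2 ^ i = n / 2 ^ (i+1) := by
          rw [Nat.div_div_eq_div_mul, pow_succ']
        rw [this]

lemma toDigits2_lt_two_pow : ∀ (n : Nat), n < 2 ^ (Nat.toDigits 2 n).length := by
  intro n
  induction n using Nat.strong_induction_on with
  | _ n ih =>
    by_cases h : n < 2
    · rw [toDigits2_lt n h]; simpa using h
    · rw [toDigits2_rec n (by omega)]
      have hlt : n / 2 < n := Nat.div_lt_self (by omega) (by omega)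
      have := ih (n/2) hlt
      simp only [List.length_append, List.length_singleton]
      rw [pow_succ]
      omega

lemma blen_pos (m : Nat) (h : 1 ≤ m) : 1 ≤ PySem.Int.bitLength (m : Int) := by
  rw [PySem.Int.bitLength_natCast (m := m) h]
  omega

lemma toDigits2_length : ∀ (n : Nat),
    (Nat.toDigits 2 n).length = max (PySem.Int.bitLength (n : Int)) 1 := by
  intro n
  induction n using Nat.strong_induction_on with
  | _ n ih =>
    by_cases h : n < 2
    · have : n = 0 ∨ n = 1 := by omega
      rcases this with h1 | h1 <;> subst h1 <;> rw [toDigits2_lt _ (by omega)] <;> simp <;> decide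
    · rw [toDigits2_rec n (by omega)]
      have hlt : n / 2 < n := Nat.div_lt_self (by omega) (by omega)
      have h1 := ih (n/2) hlt
      have h2 : 1 ≤ PySem.Int.bitLength ((n/2 : Nat) : Int) := blen_pos _ (by omega)
      have h3 := PySem.Int.bitLength_natCast (m := n) (by omega)
      simp only [List.length_append, List.length_singleton]
      omega

lemma blen_le_iff (n L : Nat) : PySem.Int.bitLength (n : Int) ≤ L ↔ n < 2 ^ L := by
  constructor
  · intro h
    have h1 := PySem.Int.lt_two_pow_bitLength (n : Int)
    simp only [Int.natAbs_natCast] at h1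
    calc n < 2 ^ PySem.Int.bitLength (n : Int) := h1
      _ ≤ 2 ^ L := Nat.pow_le_pow_right (by omega) h
  · intro h
    by_contra hc
    push_neg at hc
    have hn0 : n ≠ 0 := by
      intro h0; subst h0; simp [PySem.Int.bitLength_zero] at hc
    have h2 := PySem.Int.two_pow_bitLength_le (n : Int) (by exact_mod_cast hn0)
    simp only [Int.natAbs_natCast] at h2
    have : 2 ^ L ≤ 2 ^ (PySem.Int.bitLength (n : Int) - 1) := Nat.pow_le_pow_right (by omega) (by omega)
    omega


-- canonical quantities
def cntB (A : List Int) (i : Nat) : Int := (A.map (fun a => ((a.toNat / 2 ^ i % 2 : Nat) : Int))).sum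
def lowF (N : Int) (A : List Int) (i : Nat) : Int :=
  ∑ j ∈ Finset.range i, max (cntB A j) (N - cntB A j) * 2 ^ j
def selB (N : Int) (A : List Int) (kn j : Nat) : Int :=
  if kn / 2 ^ j % 2 = 1 then N - cntB A j else cntB A j
def topP (N : Int) (A : List Int) (kn M i : Nat) : Int :=
  ∑ j ∈ Finset.Ico i M, selB N A kn j * 2 ^ j
def acand (N : Int) (A : List Int) (kn M i : Nat) : Int :=
  topP N A kn M (i + 1) + cntB A i * 2 ^ i + lowF N A i
def canonV (N : Int) (A : List Int) (kn M : Nat) : Int :=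
  (List.range M).foldl
    (fun acc i => if kn / 2 ^ i % 2 = 1 then max acc (acand N A kn M i) else acc) 0

lemma listsum_finset (n : Nat) (f : Nat → Int) :
    ((List.range n).map f).sum = ∑ i ∈ Finset.range n, f i := Int.neg_inj.mp rfl

lemma zipIdx_map_range {α : Type} (h : Nat → α) (n : Nat) :
    ((List.range n).map h).zipIdx = (List.range n).map (fun i => (h i, i)) := by
  apply List.ext_getElem
  · simp
  · intro i h1 h2; simp [List.getElem_zipIdx]

lemma foldmax_out (P : Nat → Prop) [DecidablePred P] (g : Nat → Int) :
    ∀ (l : List Nat) (b x : Int),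
      l.foldl (fun acc i => if P i then max acc (g i) else acc) (max b x)
        = max (l.foldl (fun acc i => if P i then max acc (g i) else acc) b) x := by
  intro l
  induction l with
  | nil => intro b x; simp
  | cons h t ih =>
    intro b x
    by_cases hP : P h
    · simp only [List.foldl_cons, if_pos hP, max_right_comm b x (g h)]
      exact ih (max b (g h)) x
    · simp only [List.foldl_cons, if_neg hP]
      exact ih b x

-- the B-side clean step function
def stepB (N : Int) (A : List Int) (kn : Nat) (s : Int × Int) (i : Nat) : Int × Int :=
  if kn / 2 ^ i % 2 = 1 then
    (max s.1 (s.2 + cntB A i * 2 ^ i + lowF N A i), s.2 + (N - cntB A i) * 2 ^ i)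
  else (s.1, s.2 + cntB A i * 2 ^ i)

lemma Bfold (N : Int) (A : List Int) (kn M : Nat) :
    ∀ (n : Nat), n ≤ M → ∀ (b : Int),
      ((List.range n).reverse).foldl (stepB N A kn) (b, topP N A kn M n)
        = ((List.range n).foldl
            (fun acc i => if kn / 2 ^ i % 2 = 1 then max acc (acand N A kn M i) else acc) b,
           topP N A kn M 0) := by
  intro n
  induction n with
  | zero =>
    intro _ b
    simp [topP]
  | succ n ih =>
    intro hn b
    have hrev : (List.range (n+1)).reverse = n :: (List.range n).reverse := by
      rw [List.range_succ, List.reverse_append]; rfl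
    have htop : topP N A kn M n = selB N A kn n * 2 ^ n + topP N A kn M (n + 1) := by
      rw [topP, topP, Finset.sum_eq_sum_Ico_succ_bot (by omega)]
    rw [hrev, List.foldl_cons]
    by_cases hb : kn / 2 ^ n % 2 = 1
    · have hstep : stepB N A kn (b, topP N A kn M (n+1)) n
          = (max b (acand N A kn M n), topP N A kn M n) := by
        rw [stepB, if_pos hb, htop, selB, if_pos hb]
        simp only [acand, Prod.mk.injEq]
        refine ⟨trivial, by ring⟩
      rw [hstep, ih (by omega) (max b (acand N A kn M n))]
      rw [List.range_succ, List.foldl_append, List.foldl_cons, List.foldl_nil, if_pos hb]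
      rw [foldmax_out (fun i => kn / 2 ^ i % 2 = 1) (acand N A kn M)]
    · have hstep : stepB N A kn (b, topP N A kn M (n+1)) n = (b, topP N A kn M n) := by
        rw [stepB, if_neg hb, htop, selB, if_neg hb]
        simp only [Prod.mk.injEq]
        refine ⟨trivial, by ring⟩
      rw [hstep, ih (by omega) b]
      rw [List.range_succ, List.foldl_append, List.foldl_cons, List.foldl_nil, if_neg hb]

lemma band_shift (a : Int) (ha : 0 ≤ a) (i : Nat) :
    PySem.Int.band (a >>> i) 1 = ((a.toNat / 2 ^ i % 2 : Nat) : Int) := by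
  have h1 : a = ((a.toNat : Nat) : Int) := (Int.toNat_of_nonneg ha).symm
  rw [h1, ← Int.natCast_shiftRight, PySem.Int.band_one]
  have h2 : (2 : Int) = ((2 : Nat) : Int) := rfl
  rw [h2, PySem.Int.mod_natCast, Nat.shiftRight_eq_div_pow]
  simp

lemma freeL (N : Int) (cf : Nat → Int) : ∀ (n : Nat),
    (List.range n).foldl
        (fun fr i => fr ++ [PySem.List.pyGetD fr (-1) 0 + max (cf i) (N - cf i) * (2 : Int) ^ i]) [0]
      = (List.range (n+1)).map (fun i => ∑ j ∈ Finset.range i, max (cf j) (N - cf j) * 2 ^ j) := by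
  intro n
  induction n with
  | zero => simp
  | succ n ih =>
    rw [List.range_succ, List.foldl_append, ih, List.foldl_cons, List.foldl_nil]
    rw [List.range_succ (n := n+1), List.map_append]
    congr 1
    have : (List.range (n+1)).map (fun i => ∑ j ∈ Finset.range i, max (cf j) (N - cf j) * 2 ^ j)
        = (List.range n).map (fun i => ∑ j ∈ Finset.range i, max (cf j) (N - cf j) * 2 ^ j)
          ++ [∑ j ∈ Finset.range n, max (cf j) (N - cf j) * 2 ^ j] := by
      rw [List.range_succ, List.map_append]; rfl
    rw [this, PySem.List.pyGetD_neg_one_append_singleton]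
    simp [Finset.sum_range_succ]

theorem B_eq_V (K : Int) (x : Int) (t : List Int)
    (hK : 0 ≤ K + 1) (hA : ∀ a ∈ x :: t, 0 ≤ a) :
    max_f_alt K (x :: t) =
      canonV ((x :: t).length : Int) (x :: t) (K + 1).toNat
        (max (PySem.Int.bitLength (max (List.foldl max x t) (K + 1))) 1) := by
  unfold max_f_alt
  rw [PySem.List.max?_id_cons x t, Option.getD_some]
  simp only []
  set A := x :: t with hAdef
  set N : Int := (A.length : Int) with hN
  set kn := (K + 1).toNat with hkn
  set mA := List.foldl max x t with hmA
  set m := max mA (K + 1) with hm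
  set L := max (PySem.Int.bitLength m) 1 with hL
  set c := (List.range L).map (fun i => (A.map (fun a => PySem.Int.band (a >>> i) 1)).sum) with hc
  have hcget : ∀ i, i < L → c.getD i 0 = cntB A i := by
    intro i hi
    rw [hc, PySem.List.getD_map_range _ _ _ _ hi, cntB]
    congr 1
    apply List.map_congr_left
    intro a ha
    exact band_shift a (hA a ha) i
  rw [freeL N (fun i => c.getD i 0) L]
  set free := (List.range (L+1)).map
      (fun i => ∑ j ∈ Finset.range i, max (c.getD j 0) (N - c.getD j 0) * 2 ^ j) with hfree
  have hfreeget : ∀ i, i < L → free.getD i 0 = lowF N A i := by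
    intro i hi
    rw [hfree, PySem.List.getD_map_range _ _ _ _ (by omega), lowF]
    apply Finset.sum_congr rfl
    intro j hj
    rw [hcget j (by simp at hj; omega)]
  have hstep : ∀ (s : Int × Int) (i : Nat), i ∈ (List.range L).reverse →
      (if PySem.Int.band ((K + 1) >>> i) 1 ≠ 0 then
          (max s.1 (s.2 + c.getD i 0 * (2 : Int) ^ i + free.getD i 0),
            s.2 + (N - c.getD i 0) * (2 : Int) ^ i)
        else (s.1, s.2 + c.getD i 0 * (2 : Int) ^ i)) = stepB N A kn s i := by
    intro s i hi
    have hiL : i < L := by simpa using hi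
    have hb : PySem.Int.band ((K + 1) >>> i) 1 = ((kn / 2 ^ i % 2 : Nat) : Int) := band_shift (K+1) hK i
    rw [stepB]
    by_cases h1 : kn / 2 ^ i % 2 = 1
    · rw [if_pos h1, hb, h1]
      rw [if_pos (by simp), hcget i hiL, hfreeget i hiL]
    · have h0 : kn / 2 ^ i % 2 = 0 := by omega
      rw [if_neg h1, hb, h0]
      rw [if_neg (by simp), hcget i hiL]
  rw [PySem.List.foldl_congr_mem ((List.range L).reverse) _ (stepB N A kn) ((0:Int),(0:Int)) hstep]
  have h00 : ((0 : Int), (0 : Int)) = ((0 : Int), topP N A kn L L) := by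
    rw [topP]; simp
  rw [h00, Bfold N A kn L L le_rfl 0, canonV]

lemma toBinChars_natCast (v : Nat) : PySem.Int.toBinChars (v : Int) = Nat.toDigits 2 v := by
  simp [PySem.Int.toBinChars]

lemma padBin_digit (w i v : Nat) (hw : (Nat.toDigits 2 v).length ≤ w) (hi : i < w) :
    chInt ((PySem.List.pyGet? (padBin w (v : Int)) (-((i : Int) + 1))).getD '0')
      = ((v / 2 ^ i % 2 : Nat) : Int) := by
  set s := Nat.toDigits 2 v with hs
  have hxs : padBin w (v : Int) = List.replicate (w - s.length) '0' ++ s := by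
    rw [padBin, toBinChars_natCast]
  have hlen : (List.replicate (w - s.length) '0' ++ s).length = w := by
    simp; omega
  have hneg : (-((i : Int) + 1)) = -(((i+1 : Nat)) : Int) := by push_cast; ring
  rw [hxs, hneg, PySem.List.pyGet?_neg_natCast _ (i+1) (by omega) (by omega)]
  rw [hlen]
  have hrev : (List.replicate (w - s.length) '0' ++ s)[w - (i+1)]?
      = (s.reverse ++ List.replicate (w - s.length) '0')[i]? := by
    have hre : s.reverse ++ List.replicate (w - s.length) '0'
        = (List.replicate (w - s.length) '0' ++ s).reverse := by
      rw [List.reverse_append, List.reverse_replicate]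
    rw [hre, List.getElem?_reverse (by rw [List.length_append, List.length_replicate]; omega)]
    congr 1
    simp only [List.length_append, List.length_replicate]
    omega
  rw [hrev]
  have hgd : ((s.reverse ++ List.replicate (w - s.length) '0')[i]?).getD '0'
      = (s.reverse ++ List.replicate (w - s.length) '0').getD i '0' := by
    rw [List.getD_eq_getElem?_getD]
  rw [hgd]
  have hchar : (s.reverse ++ List.replicate (w - s.length) '0').getD i '0'
      = if v / 2 ^ i % 2 = 1 then '1' else '0' := by
    by_cases hsi : i < s.length
    · rw [List.getD_append _ _ _ _ (by simpa using hsi)]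
      rw [hs, toDigits2_rev_getD]
    · have hbig : v / 2 ^ i = 0 := by
        apply Nat.div_eq_of_lt
        calc v < 2 ^ s.length := toDigits2_lt_two_pow v
          _ ≤ 2 ^ i := Nat.pow_le_pow_right (by omega) (by omega)
      rw [hbig]
      simp only [Nat.zero_mod, if_neg (by omega : ¬ (0 : Nat) = 1)]
      rw [List.getD_eq_getElem?_getD, List.getElem?_append_right (by simpa using hsi)]
      rw [List.getElem?_replicate]
      simp only [List.length_reverse]
      rw [if_pos (by omega)]
      rfl
  rw [hchar]
  have hv2 : v / 2 ^ i % 2 = 0 ∨ v / 2 ^ i % 2 = 1 := by omega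
  rcases hv2 with h1 | h1 <;> rw [h1] <;> simp <;> decide

lemma toDigits2_length_mono (u v : Nat) (h : u ≤ v) :
    (Nat.toDigits 2 u).length ≤ (Nat.toDigits 2 v).length := by
  rw [toDigits2_length, toDigits2_length]
  have h1 : v < 2 ^ PySem.Int.bitLength (v : Int) := (blen_le_iff v _).mp le_rfl
  have h2 : PySem.Int.bitLength (u : Int) ≤ PySem.Int.bitLength (v : Int) :=
    (blen_le_iff u _).mpr (by omega)
  omega

lemma cntB_nonneg (A : List Int) (i : Nat) : 0 ≤ cntB A i := by
  rw [cntB]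
  induction A with
  | nil => simp
  | cons a t ih => simp only [List.map_cons, List.sum_cons]; positivity

lemma cntB_le (A : List Int) (i : Nat) : cntB A i ≤ (A.length : Int) := by
  rw [cntB]
  induction A with
  | nil => simp
  | cons a t ih =>
    simp only [List.map_cons, List.sum_cons, List.length_cons]
    have h1 : a.toNat / 2 ^ i % 2 ≤ 1 := by omega
    have h2 : ((a.toNat / 2 ^ i % 2 : Nat) : Int) ≤ 1 := by exact_mod_cast h1
    omega

lemma acand_nonneg (N : Int) (A : List Int) (kn M i : Nat) (hN : N = (A.length : Int)) :
    0 ≤ acand N A kn M i := by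
  have hsel : ∀ j, 0 ≤ selB N A kn j := by
    intro j
    rw [selB]
    have := cntB_nonneg A j
    have := cntB_le A j
    split <;> omega
  rw [acand]
  have h1 : 0 ≤ topP N A kn M (i+1) := by
    rw [topP]; apply Finset.sum_nonneg; intro j _; exact mul_nonneg (hsel j) (by positivity)
  have h2 : 0 ≤ lowF N A i := by
    rw [lowF]; apply Finset.sum_nonneg; intro j _
    have := cntB_nonneg A j
    have := cntB_le A j
    apply mul_nonneg (by omega) (by positivity)
  have h3 : 0 ≤ cntB A i * 2 ^ i := mul_nonneg (cntB_nonneg A i) (by positivity)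
  omega

lemma fold_ifzero (P : Nat → Prop) [DecidablePred P] (g : Nat → Int) :
    ∀ (l : List Nat) (b : Int), 0 ≤ b →
      l.foldl (fun acc i => max acc (if P i then g i else 0)) b
        = l.foldl (fun acc i => if P i then max acc (g i) else acc) b := by
  intro l
  induction l with
  | nil => intro b _; rfl
  | cons h t ih =>
    intro b hb
    by_cases hP : P h
    · simp only [List.foldl_cons, if_pos hP]
      exact ih (max b (g h)) (le_trans hb (le_max_left _ _))
    · simp only [List.foldl_cons, if_neg hP, max_eq_left hb]
      exact ih b hb

lemma foldl_max_zero_cons (v : Int) (l : List Int) (hv : 0 ≤ v) :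
    l.foldl max v = (v :: l).foldl max 0 := by
  simp [max_eq_right hv]

theorem A_eq_V (K : Int) (x : Int) (t : List Int)
    (hK : 0 ≤ K + 1) (hA : ∀ a ∈ x :: t, 0 ≤ a) :
    max_f K (x :: t) =
      canonV ((x :: t).length : Int) (x :: t) (K + 1).toNat
        (max (PySem.Int.bitLength (max (List.foldl max x t) (K + 1))) 1) := by
  unfold max_f
  rw [PySem.List.max?_id_cons x t, Option.getD_some]
  simp only []
  set A := x :: t with hAdef
  set N : Int := (A.length : Int) with hN
  set kn := (K + 1).toNat with hkn
  have hKp : K + 1 = (kn : Int) := (Int.toNat_of_nonneg hK).symm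
  set mA := List.foldl max x t with hmA
  set maxKA := max (K + 1) mA with hmaxKA
  have hmaxKA0 : 0 ≤ maxKA := le_trans hK (le_max_left _ _)
  set L := max (PySem.Int.bitLength (max mA (K + 1))) 1 with hLdef
  have hLlen : (Nat.toDigits 2 maxKA.toNat).length = L := by
    rw [toDigits2_length]
    have h2 : ((maxKA.toNat : Nat) : Int) = maxKA := Int.toNat_of_nonneg hmaxKA0
    rw [h2, hmaxKA, max_comm (K+1) mA]
  have hMLen : (PySem.Int.toBinChars maxKA).length = L := by
    conv_lhs => rw [(Int.toNat_of_nonneg hmaxKA0).symm]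
    rw [toBinChars_natCast, hLlen]
  rw [hMLen]
  have hlenKval : (PySem.Int.toBinChars (K + 1)).length = (Nat.toDigits 2 kn).length := by
    rw [hKp, toBinChars_natCast]
  rw [hlenKval]
  set lk := (Nat.toDigits 2 kn).length with hlk
  have hlk1 : 1 ≤ lk := by rw [hlk, toDigits2_length]; omega
  have hknmax : kn ≤ maxKA.toNat := by
    have : K + 1 ≤ maxKA := le_max_left _ _
    omega
  have hlkL : lk ≤ L := by
    rw [hlk, ← hLlen]
    exact toDigits2_length_mono kn maxKA.toNat hknmax
  have hknlt : kn < 2 ^ lk := by rw [hlk]; exact toDigits2_lt_two_pow kn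
  have hmaxmem : ∀ a ∈ A, a ≤ mA := by
    intro a ha
    rcases List.mem_cons.mp ha with h | h
    · subst h; exact (PySem.List.le_foldl_max t a).1
    · exact (PySem.List.le_foldl_max t x).2 a h
  have hg1 : ∀ j, j < L →
      ((A.map (fun a => padBin L a)).map
        (fun s => chInt ((PySem.List.pyGet? s (-((j : Int) + 1))).getD '0'))).sum = cntB A j := by
    intro j hj
    rw [List.map_map, cntB]
    congr 1
    apply List.map_congr_left
    intro a ha
    simp only [Function.comp]
    have ha0 := hA a ha
    have h1 : a = ((a.toNat : Nat) : Int) := (Int.toNat_of_nonneg ha0).symm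
    rw [h1]
    refine padBin_digit L j a.toNat ?_ hj
    calc (Nat.toDigits 2 a.toNat).length
        ≤ (Nat.toDigits 2 maxKA.toNat).length := by
          refine toDigits2_length_mono _ _ ?_
          have hle : a ≤ maxKA := le_trans (hmaxmem a ha) (le_max_right _ _)
          omega
      _ = L := hLlen
  have hg2 : ∀ j, j < L →
      chInt ((PySem.List.pyGet? (padBin L (K + 1)) (-((j : Int) + 1))).getD '0')
        = ((kn / 2 ^ j % 2 : Nat) : Int) := by
    intro j hj
    rw [hKp]
    refine padBin_digit L j kn ?_ hj
    rw [← hlk]; omega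
  have hbitK : ∀ fl, fl < L →
      ((List.range L).map (fun (i : Nat) =>
        chInt ((PySem.List.pyGet? (padBin L (K + 1)) (-((i : Int) + 1))).getD '0'))).getD fl 0
        = ((kn / 2 ^ fl % 2 : Nat) : Int) := by
    intro fl hfl
    rw [PySem.List.getD_map_range _ _ _ _ hfl]
    exact hg2 fl hfl
  have hfval : (List.range lk).map (fun fl =>
      if ((List.range L).map (fun (i : Nat) =>
            chInt ((PySem.List.pyGet? (padBin L (K + 1)) (-((i : Int) + 1))).getD '0'))).getD fl 0 = 0
      then 0
      else
        let digitX := ((((List.range L).map (fun (i : Nat) =>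
            ((A.map (fun a => padBin L a)).map
              (fun s => chInt ((PySem.List.pyGet? s (-((i : Int) + 1))).getD '0'))).sum)).zip
          ((List.range L).map (fun (i : Nat) =>
            chInt ((PySem.List.pyGet? (padBin L (K + 1)) (-((i : Int) + 1))).getD '0')))).zipIdx).map
          (fun p =>
            if p.2 < fl then max p.1.1 (N - p.1.1)
            else if p.2 = fl then p.1.1
            else if p.1.2 = 0 then p.1.1 else N - p.1.1)
        (digitX.zipIdx.map (fun q => (2 : Int) ^ q.2 * q.1)).sum)
      = (List.range lk).map (fun fl => if kn / 2 ^ fl % 2 = 1 then acand N A kn L fl else 0) := by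
    apply List.map_congr_left
    intro fl hfl0
    have hfl : fl < lk := List.mem_range.mp hfl0
    have hflL : fl < L := lt_of_lt_of_le hfl hlkL
    rw [hbitK fl hflL]
    simp only []
    rw [List.zip_map', zipIdx_map_range, List.map_map, zipIdx_map_range, List.map_map]
    by_cases hb : kn / 2 ^ fl % 2 = 1
    · rw [if_neg (by rw [hb]; simp), if_pos hb]
      rw [listsum_finset]
      trans ∑ j ∈ Finset.range L, ((2 : Int) ^ j *
          (if j < fl then max (cntB A j) (N - cntB A j)
           else if j = fl then cntB A j
           else if ((kn / 2 ^ j % 2 : Nat) : Int) = 0 then cntB A j else N - cntB A j))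
      · apply Finset.sum_congr rfl
        intro j hj0
        have hj := Finset.mem_range.mp hj0
        simp only [Function.comp]
        rw [hg1 j hj, hg2 j hj]
      rw [← Finset.sum_range_add_sum_Ico _ (by omega : fl + 1 ≤ L), Finset.sum_range_succ]
      have e1 : ∑ j ∈ Finset.range fl, ((2 : Int) ^ j *
            (if j < fl then max (cntB A j) (N - cntB A j)
             else if j = fl then cntB A j
             else if ((kn / 2 ^ j % 2 : Nat) : Int) = 0 then cntB A j else N - cntB A j))
          = lowF N A fl := by
        rw [lowF]
        apply Finset.sum_congr rfl
        intro j hj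
        have : j < fl := Finset.mem_range.mp hj
        rw [if_pos this]; ring
      have e2 : (2 : Int) ^ fl *
            (if fl < fl then max (cntB A fl) (N - cntB A fl)
             else if fl = fl then cntB A fl
             else if ((kn / 2 ^ fl % 2 : Nat) : Int) = 0 then cntB A fl else N - cntB A fl)
          = cntB A fl * 2 ^ fl := by
        rw [if_neg (by omega), if_pos rfl]; ring
      have e3 : ∑ j ∈ Finset.Ico (fl + 1) L, ((2 : Int) ^ j *
            (if j < fl then max (cntB A j) (N - cntB A j)
             else if j = fl then cntB A j
             else if ((kn / 2 ^ j % 2 : Nat) : Int) = 0 then cntB A j else N - cntB A j))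
          = topP N A kn L (fl + 1) := by
        rw [topP]
        apply Finset.sum_congr rfl
        intro j hj
        have hj2 := Finset.mem_Ico.mp hj
        rw [if_neg (by omega), if_neg (by omega), selB]
        by_cases hbj : kn / 2 ^ j % 2 = 1
        · rw [if_pos hbj, hbj, if_neg (by simp)]; ring
        · have h0 : kn / 2 ^ j % 2 = 0 := by omega
          rw [if_neg hbj, h0, if_pos (by simp)]; ring
      rw [e1, e2, e3, acand]
      ring
    · have h0 : kn / 2 ^ fl % 2 = 0 := by omega
      rw [if_pos (by rw [h0]; simp), if_neg hb]
  rw [hfval]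
  obtain ⟨u, hu⟩ : ∃ u, lk = u + 1 := ⟨lk - 1, by omega⟩
  rw [hu, List.range_succ_eq_map, List.map_cons, PySem.List.max?_id_cons, Option.getD_some]
  have hF0 : 0 ≤ (if kn / 2 ^ 0 % 2 = 1 then acand N A kn L 0 else 0) := by
    split
    · exact acand_nonneg N A kn L 0 hN
    · exact le_refl 0
  rw [foldl_max_zero_cons _ _ hF0]
  have hlist : (if kn / 2 ^ 0 % 2 = 1 then acand N A kn L 0 else 0) ::
      ((List.range u).map Nat.succ).map
        (fun fl => if kn / 2 ^ fl % 2 = 1 then acand N A kn L fl else 0)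
      = (List.range (u+1)).map
        (fun fl => if kn / 2 ^ fl % 2 = 1 then acand N A kn L fl else 0) := by
    rw [List.range_succ_eq_map, List.map_cons]
  rw [hlist, List.foldl_map]
  rw [fold_ifzero (fun i => kn / 2 ^ i % 2 = 1) (acand N A kn L) (List.range (u+1)) 0 le_rfl]
  have hL2 : L = (u+1) + (L - (u+1)) := by omega
  rw [canonV]
  have hsplit : List.range L = List.range (u+1) ++ (List.range (L - (u+1))).map ((u+1) + ·) := by
    conv_lhs => rw [hL2]
    rw [List.range_add]
  rw [hsplit, List.foldl_append]
  have htail : ∀ (acc : Int), ∀ i ∈ (List.range (L - (u+1))).map ((u+1) + ·),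
      (fun (acc : Int) (i : Nat) =>
        if kn / 2 ^ i % 2 = 1 then max acc (acand N A kn L i) else acc) acc i
        = (fun (acc : Int) (_ : Nat) => acc) acc i := by
    intro acc i hi
    obtain ⟨k, _, hk⟩ := List.mem_map.mp hi
    have hbit : kn / 2 ^ i % 2 = 0 := by
      have h1 : (2 : Nat) ^ lk ≤ 2 ^ i := Nat.pow_le_pow_right (by omega) (by omega)
      have : kn / 2 ^ i = 0 := Nat.div_eq_of_lt (by omega)
      omega
    simp only [if_neg (by omega : ¬ kn / 2 ^ i % 2 = 1)]
  rw [PySem.List.foldl_congr_mem _ _ _ _ htail, PySem.List.foldl_ignore]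

-- ===== VERDICT (by name: the statement is the Claim_ definition above) =====
theorem max_f_spec : Claim_equal_max_f := by
  intro K A _ hPre
  obtain ⟨hne, hK, hA⟩ := hPre
  match A, hne with
  | x :: t, _ =>
    unfold Spec_max_f
    rw [A_eq_V K x t hK hA, B_eq_V K x t hK hA]
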